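-- pv_equiv track=rewrite | github.com/pypi-data/pypi-mirror-229 | packages/full-outer-join/full_outer_join-1.0.0-py3-none-any.whl/full_outer_join/join.py | cross_join
-- ===== SOURCE A (Python) =====
-- from itertools import groupby, count, product
--
-- def cross_join(join_output, null=None):
--     """Transform the (group_key, key_batches) output of one of the other
--     joins into a (group_key, row) format.
--
--     The value of null, default None, is used as a placeholder for any iterable
--     missing values in that key batch."""
--     for group_key, key_batches in join_output:
--         yield from (
--             (group_key, row)
--             for row in product(
--                 *(batch if batch else [null] for batch in key_batches)
--             )
--         )
-- ===== SOURCE B (Python) =====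
-- def cross_join(join_output, null=None):
--     for group_key, key_batches in join_output:
--         pools = [list(batch) or [null] for batch in key_batches]
--
--         def rec(i):
--             if i == len(pools):
--                 yield ()
--             else:
--                 for item in pools[i]:
--                     for rest in rec(i + 1):
--                         yield (item,) + rest
--
--         for row in rec(0):
--             yield (group_key, row)
-- ===== Notes on version B (the rewrite author's own statement) =====
-- stated objective: alternative
-- what changed: Replaces itertools.product's left-to-right accumulator product (extend every partial row with each item of the next pool) with a right-recursive generator that prepends each item of the current pool to the product of the remaining pools.
-- outside the precondition, e.g. on cross_join([(1, [[]])], None): A returns [(1, (None,))], B returns [(1, (None,))]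
import Mathlib
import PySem

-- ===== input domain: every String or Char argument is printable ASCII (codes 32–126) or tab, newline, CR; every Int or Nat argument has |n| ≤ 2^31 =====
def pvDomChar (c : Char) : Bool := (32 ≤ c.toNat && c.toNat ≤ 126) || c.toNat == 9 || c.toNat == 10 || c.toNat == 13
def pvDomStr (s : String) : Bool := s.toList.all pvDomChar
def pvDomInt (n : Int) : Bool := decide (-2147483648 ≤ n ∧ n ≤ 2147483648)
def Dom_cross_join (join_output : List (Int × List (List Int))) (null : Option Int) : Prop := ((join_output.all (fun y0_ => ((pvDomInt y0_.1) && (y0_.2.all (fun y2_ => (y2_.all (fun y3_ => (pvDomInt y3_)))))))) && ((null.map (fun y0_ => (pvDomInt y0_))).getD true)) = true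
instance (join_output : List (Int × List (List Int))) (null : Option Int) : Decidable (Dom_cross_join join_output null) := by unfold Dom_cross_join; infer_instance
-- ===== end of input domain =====

-- B replaces itertools.product's left-to-right accumulator product with a right-recursive
-- generator that prepends each item to the product of the remaining pools (objective: alternative).

-- ===== PORT A =====
-- itertools.product over lists: accumulator product, result starts at [[]] and each pool
-- extends every partial row on the right (last pool varies fastest) — exact for finite lists.
def pyProduct (pools : List (List Int)) : List (List Int) :=
  pools.foldl (fun acc pool => acc.flatMap (fun r => pool.map (fun x => r ++ [x]))) [[]]

-- 'batch if batch else [null]' — under Pre_ an empty batch implies null = some v, so getD is exact.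
def poolOf (null : Option Int) (batch : List Int) : List Int :=
  if batch.isEmpty then [null.getD 0] else batch

def cross_join (join_output : List (Int × List (List Int))) (null : Option Int) : List (Int × List Int) :=
  join_output.flatMap (fun gb =>
    (pyProduct (gb.2.map (poolOf null))).map (fun row => (gb.1, row)))

-- ===== PORT B =====
-- rec(i): right recursion over the pools, prepending the current item to each product of the rest.
def recProd (null : Option Int) : List (List Int) → List (List Int)
  | [] => [[]]
  | batch :: rest =>
      (poolOf null batch).flatMap (fun item => (recProd null rest).map (fun r => item :: r))

def cross_join_alt (join_output : List (Int × List (List Int))) (null : Option Int) : List (Int × List Int) :=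
  join_output.flatMap (fun gb =>
    (recProd null gb.2).map (fun row => (gb.1, row)))

-- ===== PRECONDITION & SPEC =====
-- Pre_ excludes inputs where some key batch is empty while null is None: there Python A (and B)
-- yield rows containing None, which is not a value of the declared row type List Int.
def Pre_cross_join (join_output : List (Int × List (List Int))) (null : Option Int) : Prop :=
  null ≠ none ∨ ∀ gb ∈ join_output, ∀ b ∈ gb.2, b ≠ []
instance (join_output : List (Int × List (List Int))) (null : Option Int) : Decidable (Pre_cross_join join_output null) := by unfold Pre_cross_join; infer_instance

def pvWitness_cross_join : (List (Int × List (List Int))) × Option Int :=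
  ([(1, [[2, 3], []]), (4, [[5]])], some 7)

def Spec_cross_join (join_output : List (Int × List (List Int))) (null : Option Int) (out : List (Int × List Int)) : Prop := out = cross_join_alt join_output null
instance (join_output : List (Int × List (List Int))) (null : Option Int) (out : List (Int × List Int)) : Decidable (Spec_cross_join join_output null out) := by unfold Spec_cross_join; infer_instance

-- ===== CLAIM (what is proved, stated in full; the proofs are below) =====
def Claim_equal_cross_join : Prop := ∀ (join_output : List (Int × List (List Int))) (null : Option Int), Dom_cross_join join_output null → Pre_cross_join join_output null → Spec_cross_join join_output null (cross_join join_output null)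

-- ===== LEMMAS AND PROOFS =====

-- Invariant of the accumulator product: folding the remaining pools onto any accumulator
-- appends every right-recursive product of those pools to every accumulated row.
theorem foldl_prod_eq (null : Option Int) (batches : List (List Int)) (acc : List (List Int)) :
    batches.foldl (fun acc pool => acc.flatMap (fun r => (poolOf null pool).map (fun x => r ++ [x]))) acc
      = acc.flatMap (fun r => (recProd null batches).map (fun t => r ++ t)) := by
  induction batches generalizing acc with
  | nil => simp [recProd]
  | cons b rest ih =>
      rw [List.foldl_cons, ih, List.flatMap_assoc]
      congr 1; funext r
      simp [recProd, List.map_flatMap, List.flatMap_map, List.map_map, Function.comp_def,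
        List.append_assoc]

theorem pyProduct_eq_recProd (null : Option Int) (batches : List (List Int)) :
    pyProduct (batches.map (poolOf null)) = recProd null batches := by
  unfold pyProduct
  rw [List.foldl_map, foldl_prod_eq]
  simp

-- ===== VERDICT (by name: the statement is the Claim_ definition above) =====
theorem cross_join_spec : Claim_equal_cross_join := by
  intro join_output null _ _
  unfold Spec_cross_join cross_join cross_join_alt
  congr 1; funext gb
  rw [pyProduct_eq_recProd]
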